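-- pv_equiv track=rewrite | github.com/georgiy-pruss/Cryptography | pw.py | lengths
-- ===== SOURCE A (Python) =====
-- def lengths(a):
--   mi = m0 = m1 = m2 = 0
--   for i,x in a:
--     if i>mi: mi=i
--     x = x.split("\t")
--     if len(x[0])>m0: m0=len(x[0])
--     if len(x[1])>m1: m1=len(x[1])
--     if len(x)>2 and len(x[2])>m2: m2=len(x[2])
--   return (len(str(mi)),m0,m1,m2)
-- ===== SOURCE B (Python) =====
-- def lengths(a):
--   rows = [(i, x.split("\t")) for i, x in a]
--   mi = max([0] + [i for i, _ in rows])
--   m0 = max([0] + [len(x[0]) for _, x in rows])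
--   m1 = max([0] + [len(x[1]) for _, x in rows])
--   m2 = max([0] + [len(x[2]) for _, x in rows if len(x) > 2])
--   return (len(str(mi)), m0, m1, m2)
-- ===== Notes on version B (the rewrite author's own statement) =====
-- stated objective: alternative
-- what changed: Replaces A's single fused scan with running maxima by a materialized table of split rows plus four independent maximum passes (one per returned component).
import Mathlib
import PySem

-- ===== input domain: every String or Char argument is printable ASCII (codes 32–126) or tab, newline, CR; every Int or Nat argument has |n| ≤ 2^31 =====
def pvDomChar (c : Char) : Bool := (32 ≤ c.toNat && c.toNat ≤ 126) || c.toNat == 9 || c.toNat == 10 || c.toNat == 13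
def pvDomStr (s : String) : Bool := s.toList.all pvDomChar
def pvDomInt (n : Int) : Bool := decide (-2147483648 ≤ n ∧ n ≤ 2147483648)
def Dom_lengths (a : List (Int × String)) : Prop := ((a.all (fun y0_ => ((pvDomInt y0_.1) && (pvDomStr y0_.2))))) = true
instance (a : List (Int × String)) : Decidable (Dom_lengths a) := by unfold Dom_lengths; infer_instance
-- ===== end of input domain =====

-- B replaces A's single fused scan with running maxima by a materialized table of
-- split rows plus four independent maximum passes (alternative decomposition, same
-- cost). Equivalence on Pre_: every string contains a tab (else Python's x[1] raises).


-- shared helper: x.split("\t"); the separator is nonempty, so split? always returns some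
def tabSplit (s : String) : List String := (PySem.Str.split? s "\t").getD []

-- ===== PORT A =====
-- x[0]/x[1]/x[2] are ported with getD ""; under Pre_lengths the index is always in
-- range, so the default is never taken (x[2] is guarded by len(x)>2 as in A).
def lengthsStep (st : Int × Int × Int × Int) (p : Int × String) : Int × Int × Int × Int :=
  let mi := if p.1 > st.1 then p.1 else st.1
  let x := tabSplit p.2
  let l0 := PySem.Str.len (x.getD 0 "")
  let m0 := if l0 > st.2.1 then l0 else st.2.1
  let l1 := PySem.Str.len (x.getD 1 "")
  let m1 := if l1 > st.2.2.1 then l1 else st.2.2.1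
  let l2 := PySem.Str.len (x.getD 2 "")
  let m2 := if (x.length : Int) > 2 ∧ l2 > st.2.2.2 then l2 else st.2.2.2
  (mi, m0, m1, m2)

def lengths (a : List (Int × String)) : Int × Int × Int × Int :=
  let s := a.foldl lengthsStep (0, 0, 0, 0)
  (PySem.Str.len (PySem.Int.toStr s.1), s.2.1, s.2.2.1, s.2.2.2)

-- ===== PORT B =====
-- max([0] + l) in Python = fold of binary max over the nonempty list [0] ++ l
def pyMax0 (l : List Int) : Int := l.foldl max 0

def lengths_alt (a : List (Int × String)) : Int × Int × Int × Int :=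
  let rows := a.map (fun p => (p.1, tabSplit p.2))
  let mi := pyMax0 (rows.map (fun r => r.1))
  let m0 := pyMax0 (rows.map (fun r => PySem.Str.len (r.2.getD 0 "")))
  let m1 := pyMax0 (rows.map (fun r => PySem.Str.len (r.2.getD 1 "")))
  let m2 := pyMax0 ((rows.filter (fun r => decide ((r.2.length : Int) > 2))).map
                      (fun r => PySem.Str.len (r.2.getD 2 "")))
  (PySem.Str.len (PySem.Int.toStr mi), m0, m1, m2)

-- ===== PRECONDITION & SPEC =====
-- Pre_ excludes exactly the inputs where Python A raises IndexError: a row whose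
-- string contains no tab (x.split("\t") then has one field and x[1] raises).
def Pre_lengths (a : List (Int × String)) : Prop :=
  ∀ p ∈ a, '\t' ∈ p.2.toList
instance (a : List (Int × String)) : Decidable (Pre_lengths a) := by unfold Pre_lengths; infer_instance
def pvWitness_lengths : (List (Int × String)) := [(12, "ab\tc"), (-3, "x\ty\tzz")]

def Spec_lengths (a : List (Int × String)) (out : Int × Int × Int × Int) : Prop := out = lengths_alt a
instance (a : List (Int × String)) (out : Int × Int × Int × Int) : Decidable (Spec_lengths a out) := by unfold Spec_lengths; infer_instance

-- ===== CLAIM (what is proved, stated in full; the proofs are below) =====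
def Claim_equal_lengths : Prop := ∀ (a : List (Int × String)), Dom_lengths a → Pre_lengths a → Spec_lengths a (lengths a)

-- ===== LEMMAS AND PROOFS =====

theorem if_gt_eq_max (m l : Int) : (if l > m then l else m) = max m l := by
  rw [max_def]; split_ifs <;> omega

theorem lengthsStep_eq (st : Int × Int × Int × Int) (p : Int × String) :
    lengthsStep st p =
      (max st.1 p.1,
       max st.2.1 (PySem.Str.len ((tabSplit p.2).getD 0 "")),
       max st.2.2.1 (PySem.Str.len ((tabSplit p.2).getD 1 "")),
       if ((tabSplit p.2).length : Int) > 2 then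
         max st.2.2.2 (PySem.Str.len ((tabSplit p.2).getD 2 ""))
       else st.2.2.2) := by
  by_cases h : ((tabSplit p.2).length : Int) > 2
  · simp [lengthsStep, h, if_gt_eq_max]
  · simp [lengthsStep, h, if_gt_eq_max]

theorem lengths_loop_eq (a : List (Int × String)) :
    ∀ mi m0 m1 m2 : Int,
      a.foldl lengthsStep (mi, m0, m1, m2) =
        ((a.map (fun p => (p.1, tabSplit p.2))).foldl (fun s r => max s r.1) mi,
         (a.map (fun p => (p.1, tabSplit p.2))).foldl
           (fun s r => max s (PySem.Str.len (r.2.getD 0 ""))) m0,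
         (a.map (fun p => (p.1, tabSplit p.2))).foldl
           (fun s r => max s (PySem.Str.len (r.2.getD 1 ""))) m1,
         ((a.map (fun p => (p.1, tabSplit p.2))).filter
            (fun r => decide ((r.2.length : Int) > 2))).foldl
           (fun s r => max s (PySem.Str.len (r.2.getD 2 ""))) m2) := by
  induction a with
  | nil => intro mi m0 m1 m2; rfl
  | cons p t ih =>
    intro mi m0 m1 m2
    rw [List.foldl_cons, lengthsStep_eq, ih]
    simp only [List.map_cons, List.filter_cons, List.foldl_cons]
    by_cases h : ((tabSplit p.2).length : Int) > 2
    · simp [h]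
    · simp [h]

theorem foldl_max_eq_pyMax0 {α : Type} (l : List α) (f : α → Int) (s : Int) :
    l.foldl (fun s r => max s (f r)) s = (l.map f).foldl max s := by
  induction l generalizing s with
  | nil => rfl
  | cons x t ih => simp [List.foldl_cons, ih]

-- ===== VERDICT (by name: the statement is the Claim_ definition above) =====
theorem lengths_spec : Claim_equal_lengths := by
  intro a _hdom _hpre
  unfold Spec_lengths lengths lengths_alt pyMax0
  rw [lengths_loop_eq]
  simp only [foldl_max_eq_pyMax0]
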